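-- pv_equiv track=rewrite | github.com/abhimaloo/PythonProjects | CodingBat/leetCode/medium_2/MAxSUmDistinctSUbArraysKLength.py | maximumSubarraySum
-- ===== SOURCE A (Python) =====
-- from typing import List
--
-- def maximumSubarraySum(nums: List[int], k: int) -> int:
--     seen = set()
--     left = 0
--     current_sum = 0
--     max_sum = 0
--
--     for right in range(len(nums)):
--         while nums[right] in seen:
--             seen.remove(nums[left])
--             current_sum -= nums[left]
--             left += 1
--
--         seen.add(nums[right])
--         current_sum += nums[right]
--
--         if right - left + 1 == k:
--             max_sum = max(max_sum, current_sum)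
--             # shrink window from the left
--             seen.remove(nums[left])
--             current_sum -= nums[left]
--             left += 1
--
--     return max_sum
-- ===== SOURCE B (Python) =====
-- def maximumSubarraySum(nums, k):
--     if k <= 0:
--         return 0
--     max_sum = 0
--     for i in range(len(nums) - k + 1):
--         window = nums[i:i + k]
--         if len(set(window)) == k:
--             max_sum = max(max_sum, sum(window))
--     return max_sum
-- ===== Notes on version B (the rewrite author's own statement) =====
-- stated objective: simpler
-- what changed: Replaced the stateful sliding window (running set, left pointer, running sum) by a brute-force scan that re-slices each k-window independently and tests distinctness with len(set(window)) == k.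
import Mathlib
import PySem

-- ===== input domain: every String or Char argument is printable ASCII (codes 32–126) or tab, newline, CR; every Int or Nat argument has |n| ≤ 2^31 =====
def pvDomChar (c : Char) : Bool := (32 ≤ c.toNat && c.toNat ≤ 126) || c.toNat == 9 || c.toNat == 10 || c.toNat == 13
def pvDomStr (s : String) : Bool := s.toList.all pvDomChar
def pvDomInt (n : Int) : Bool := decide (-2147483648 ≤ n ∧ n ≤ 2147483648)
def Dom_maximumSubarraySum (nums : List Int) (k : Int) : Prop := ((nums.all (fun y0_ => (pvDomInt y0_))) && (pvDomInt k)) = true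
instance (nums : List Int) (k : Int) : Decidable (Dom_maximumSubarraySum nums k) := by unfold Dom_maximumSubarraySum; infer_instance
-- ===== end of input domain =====

-- B replaces A's stateful sliding window by an independent re-scan of each k-window (simpler; no speed claim).

-- ===== PORT A =====
-- A's inner while loop, fuel-bounded (fuel = len + 1 always suffices: left only increases towards right);
-- seen.remove → Set.discard (exact here: on every reachable state the removed element is present);
-- nums[right]/nums[left] via pyGetD (exact here: both indices are in range on every reachable state).
def pvWhileA (nums : List Int) (right : Int) : Nat → (PySem.Set Int × Int × Int) → (PySem.Set Int × Int × Int)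
  | 0, st => st
  | fuel+1, (seen, left, cur) =>
    if PySem.Set.contains seen (PySem.List.pyGetD nums right 0) then
      pvWhileA nums right fuel
        (PySem.Set.discard seen (PySem.List.pyGetD nums left 0),
         left + 1,
         cur - PySem.List.pyGetD nums left 0)
    else (seen, left, cur)

def pvStepA (nums : List Int) (k : Int)
    (st : PySem.Set Int × Int × Int × Int) (right : Int) : PySem.Set Int × Int × Int × Int :=
  let (seen0, left0, cur0, maxs) := st
  let (seen1, left1, cur1) := pvWhileA nums right (nums.length + 1) (seen0, left0, cur0)
  let x := PySem.List.pyGetD nums right 0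
  let seen2 := PySem.Set.add seen1 x
  let cur2 := cur1 + x
  if right - left1 + 1 = k then
    (PySem.Set.discard seen2 (PySem.List.pyGetD nums left1 0),
     left1 + 1,
     cur2 - PySem.List.pyGetD nums left1 0,
     max maxs cur2)
  else (seen2, left1, cur2, maxs)

def maximumSubarraySum (nums : List Int) (k : Int) : Int :=
  ((PySem.List.pyRange 0 (nums.length : Int) 1).foldl (pvStepA nums k)
    (PySem.Set.empty, 0, 0, 0)).2.2.2

-- ===== PORT B =====
def maximumSubarraySum_alt (nums : List Int) (k : Int) : Int :=
  if k ≤ 0 then 0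
  else
    (PySem.List.pyRange 0 ((nums.length : Int) - k + 1) 1).foldl
      (fun maxs i =>
        let w := PySem.List.slice nums (some i) (some (i + k))
        if ((PySem.Set.ofList w).length : Int) = k then max maxs w.sum else maxs)
      0

-- ===== PRECONDITION & SPEC =====
def Spec_maximumSubarraySum (nums : List Int) (k : Int) (out : Int) : Prop := out = maximumSubarraySum_alt nums k
instance (nums : List Int) (k : Int) (out : Int) : Decidable (Spec_maximumSubarraySum nums k out) := by unfold Spec_maximumSubarraySum; infer_instance

-- ===== CLAIM (what is proved, stated in full; the proofs are below) =====
def Claim_equal_maximumSubarraySum : Prop := ∀ (nums : List Int) (k : Int), Dom_maximumSubarraySum nums k → Spec_maximumSubarraySum nums k (maximumSubarraySum nums k)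

-- ===== LEMMAS AND PROOFS =====

-- the window nums[l:p]
def pvWin (nums : List Int) (l p : Nat) : List Int := (nums.take p).drop l

-- least l with nums[l:p] duplicate-free
def pvDmin (nums : List Int) (p : Nat) : Nat :=
  Nat.find (p := fun l => (pvWin nums l p).Nodup)
    ⟨p, by simp [pvWin, List.drop_eq_nil_of_le (by simp [List.length_take] : (nums.take p).length ≤ p)]⟩

theorem pvWin_eq_nil {nums : List Int} {l p : Nat} (h : p ≤ l) : pvWin nums l p = [] := by
  exact List.drop_eq_nil_of_le (by simp [List.length_take]; omega)

theorem pvWin_succ {nums : List Int} {l p : Nat} (hl : l ≤ p) (hp : p < nums.length) :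
    pvWin nums l (p+1) = pvWin nums l p ++ [nums[p]] := by
  unfold pvWin
  rw [List.take_add_one, List.getElem?_eq_getElem hp]
  show ((nums.take p) ++ [nums[p]]).drop l = _
  rw [List.drop_append_of_le_length (by simp [List.length_take]; omega)]

theorem pvWin_cons {nums : List Int} {l p : Nat} (hl : l < p) (hp : p ≤ nums.length) :
    pvWin nums l p = nums[l]'(by omega) :: pvWin nums (l+1) p := by
  unfold pvWin
  rw [List.drop_eq_getElem_cons (by simp [List.length_take]; omega)]
  congr 1
  exact List.getElem_take

theorem pvWin_drop {nums : List Int} {l l' p : Nat} (h : l ≤ l') :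
    pvWin nums l' p = (pvWin nums l p).drop (l' - l) := by
  unfold pvWin
  rw [List.drop_drop]
  congr 1
  omega

theorem pvWin_mono_nodup {nums : List Int} {l l' p : Nat} (h : l ≤ l')
    (hn : (pvWin nums l p).Nodup) : (pvWin nums l' p).Nodup := by
  rw [pvWin_drop h]
  exact hn.sublist (List.drop_sublist _ _)

theorem pvDmin_nodup (nums : List Int) (p : Nat) : (pvWin nums (pvDmin nums p) p).Nodup :=
  Nat.find_spec (p := fun l => (pvWin nums l p).Nodup) _

theorem pvDmin_le_iff {nums : List Int} {p l : Nat} :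
    pvDmin nums p ≤ l ↔ (pvWin nums l p).Nodup := by
  constructor
  · intro h; exact pvWin_mono_nodup h (pvDmin_nodup nums p)
  · intro h; exact Nat.find_le (p := fun l => (pvWin nums l p).Nodup) h

theorem pvDmin_le {nums : List Int} (p : Nat) : pvDmin nums p ≤ p :=
  pvDmin_le_iff.mpr (by rw [pvWin_eq_nil (le_refl p)]; exact List.nodup_nil)

theorem pvWin_nodup_succ_iff {nums : List Int} {l p : Nat} (hl : l ≤ p) (hp : p < nums.length) :
    (pvWin nums l (p+1)).Nodup ↔ (pvWin nums l p).Nodup ∧ nums[p] ∉ pvWin nums l p := by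
  rw [pvWin_succ hl hp]
  constructor
  · intro h
    exact ⟨h.sublist (List.sublist_append_left _ _), fun hx =>
      (List.disjoint_of_nodup_append h) hx (List.mem_singleton_self _)⟩
  · rintro ⟨h1, h2⟩; exact h1.append (List.nodup_singleton _) (by simpa using h2)

theorem pvDmin_succ_le {nums : List Int} {p : Nat} (hp : p < nums.length) :
    pvDmin nums (p+1) ≤ p := by
  apply pvDmin_le_iff.mpr
  rw [pvWin_nodup_succ_iff (le_refl p) hp, pvWin_eq_nil (le_refl p)]
  exact ⟨List.nodup_nil, by simp⟩

theorem pvDmin_mono {nums : List Int} {p : Nat} (hp : p < nums.length) :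
    pvDmin nums p ≤ pvDmin nums (p+1) := by
  apply pvDmin_le_iff.mpr
  have h1 : pvDmin nums (p+1) ≤ p := pvDmin_succ_le hp
  have h2 := (pvWin_nodup_succ_iff h1 hp).mp (pvDmin_nodup nums (p+1))
  exact h2.1

theorem pvGetD_nat {nums : List Int} {i : Nat} (h : i < nums.length) :
    PySem.List.pyGetD nums (i : Int) 0 = nums[i] := by
  rw [PySem.List.pyGetD_natCast]
  exact List.getD_eq_getElem nums 0 h

theorem pvDiscard_head {x : Int} {s : List Int} (h : (x :: s).Nodup) :
    PySem.Set.discard (x :: s) x = s := by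
  have hx : x ∉ s := (List.nodup_cons.mp h).1
  show List.filter _ (x :: s) = s
  rw [List.filter_cons_of_neg (by simp)]
  apply List.filter_eq_self.mpr
  intro a ha
  have : a ≠ x := fun he => hx (he ▸ ha)
  simpa using this

-- the while loop moves left to max l (pvDmin (p+1)) and keeps the window/sum in sync
theorem pvWhileA_spec (nums : List Int) (p : Nat) (hp : p < nums.length) :
    ∀ (fuel l : Nat), l ≤ p → p - l ≤ fuel → (pvWin nums l p).Nodup →
    pvWhileA nums (p : Int) fuel (pvWin nums l p, (l : Int), (pvWin nums l p).sum)
      = (pvWin nums (max l (pvDmin nums (p+1))) p,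
         ((max l (pvDmin nums (p+1)) : Nat) : Int),
         (pvWin nums (max l (pvDmin nums (p+1))) p).sum) := by
  intro fuel
  induction fuel with
  | zero =>
      intro l hl hfuel hnd
      have hlp : l = p := by omega
      subst hlp
      rw [Nat.max_eq_left (pvDmin_succ_le hp)]
      rfl
  | succ fuel ih =>
      intro l hl hfuel hnd
      simp only [pvWhileA]
      rw [pvGetD_nat hp]
      by_cases hmem : nums[p] ∈ pvWin nums l p
      · have hlp : l < p := by
          by_contra hge
          rw [pvWin_eq_nil (by omega)] at hmem
          exact absurd hmem (List.not_mem_nil)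
        have hln : l < nums.length := by omega
        rw [if_pos ((PySem.Set.contains_iff _ _).mpr hmem), pvGetD_nat hln]
        have hcons := pvWin_cons (nums := nums) hlp (le_of_lt hp)
        have hdisc : PySem.Set.discard (pvWin nums l p) (nums[l]'hln) = pvWin nums (l+1) p := by
          rw [hcons]; exact pvDiscard_head (hcons ▸ hnd)
        have hsum : (pvWin nums l p).sum - nums[l]'hln = (pvWin nums (l+1) p).sum := by
          rw [hcons, List.sum_cons]; ring
        have hcast : (l : Int) + 1 = ((l+1 : Nat) : Int) := by push_cast; ring
        rw [hdisc, hsum, hcast]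
        have hnd' : (pvWin nums (l+1) p).Nodup := by
          rw [hcons] at hnd; exact (List.nodup_cons.mp hnd).2
        rw [ih (l+1) (by omega) (by omega) hnd']
        have hdl : l + 1 ≤ pvDmin nums (p+1) := by
          by_contra hle
          have h1 : pvDmin nums (p+1) ≤ l := by omega
          have h2 := pvDmin_le_iff.mp h1
          rw [pvWin_nodup_succ_iff hl hp] at h2
          exact h2.2 hmem
        rw [Nat.max_eq_right (by omega : l ≤ pvDmin nums (p+1)), Nat.max_eq_right hdl]
      · rw [if_neg (fun hc => hmem ((PySem.Set.contains_iff _ _).mp hc))]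
        have hd : pvDmin nums (p+1) ≤ l := pvDmin_le_iff.mpr (by
          rw [pvWin_nodup_succ_iff hl hp]; exact ⟨hnd, hmem⟩)
        rw [Nat.max_eq_left hd]

-- state characterisation for k ≥ 1
def pvL (nums : List Int) (k' p : Nat) : Nat := max (pvDmin nums p) (p + 1 - k')

def pvM (nums : List Int) (k' : Nat) : Nat → Int
  | 0 => 0
  | p+1 => if k' ≤ p+1 ∧ (pvWin nums (p+1-k') (p+1)).Nodup
           then max (pvM nums k' p) (pvWin nums (p+1-k') (p+1)).sum
           else pvM nums k' p

theorem pvStepA_spec (nums : List Int) (k' : Nat) (hk1 : 1 ≤ k') (p : Nat) (hp : p < nums.length) :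
    pvStepA nums (k' : Int)
      (pvWin nums (pvL nums k' p) p, ((pvL nums k' p : Nat) : Int),
       (pvWin nums (pvL nums k' p) p).sum, pvM nums k' p) ((p : Nat) : Int)
    = (pvWin nums (pvL nums k' (p+1)) (p+1), ((pvL nums k' (p+1) : Nat) : Int),
       (pvWin nums (pvL nums k' (p+1)) (p+1)).sum, pvM nums k' (p+1)) := by
  have hpn1 : p + 1 ≤ nums.length := hp
  have hdp : pvDmin nums (p+1) ≤ p := pvDmin_succ_le hp
  have hmono : pvDmin nums p ≤ pvDmin nums (p+1) := pvDmin_mono hp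
  have hdlep : pvDmin nums p ≤ p := pvDmin_le p
  have hLle : pvL nums k' p ≤ p := by unfold pvL; omega
  have hLnd : (pvWin nums (pvL nums k' p) p).Nodup :=
    pvWin_mono_nodup (by unfold pvL; omega) (pvDmin_nodup nums p)
  simp only [pvStepA]
  rw [pvWhileA_spec nums p hp (nums.length+1) (pvL nums k' p) hLle (by omega) hLnd]
  set d := pvDmin nums (p+1) with hd
  set m := max (pvL nums k' p) d with hm
  have hmeq : m = max d (p + 1 - k') := by unfold pvL at hm; omega
  have hmp : m ≤ p := by omega
  have hdm : d ≤ m := by omega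
  have hmnd1 : (pvWin nums m (p+1)).Nodup :=
    pvWin_mono_nodup hdm (pvDmin_nodup nums (p+1))
  have hnotmem : nums[p]'hp ∉ pvWin nums m p := ((pvWin_nodup_succ_iff hmp hp).mp hmnd1).2
  rw [pvGetD_nat hp]
  have hadd : PySem.Set.add (pvWin nums m p) (nums[p]'hp) = pvWin nums m (p+1) := by
    rw [PySem.Set.add_of_not_mem hnotmem]
    exact (pvWin_succ hmp hp).symm
  have hsum2 : (pvWin nums m p).sum + nums[p]'hp = (pvWin nums m (p+1)).sum := by
    rw [pvWin_succ hmp hp, List.sum_append, List.sum_cons, List.sum_nil, add_zero]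
  dsimp only
  by_cases hrec : (p : Int) - (m : Int) + 1 = (k' : Int)
  · rw [if_pos hrec]
    have hk'le : k' ≤ p + 1 := by omega
    have hmval : m = p + 1 - k' := by omega
    have hmn : m < nums.length := by omega
    have hcons2 := pvWin_cons (nums := nums) (show m < p + 1 by omega) hpn1
    have hdisc2 : PySem.Set.discard (pvWin nums m (p+1)) (nums[m]'hmn) = pvWin nums (m+1) (p+1) := by
      rw [hcons2]; exact pvDiscard_head (hcons2 ▸ hmnd1)
    have hsum3 : (pvWin nums m (p+1)).sum - nums[m]'hmn = (pvWin nums (m+1) (p+1)).sum := by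
      rw [hcons2, List.sum_cons]; ring
    have hL1 : pvL nums k' (p+1) = m + 1 := by unfold pvL; omega
    have hM1 : pvM nums k' (p+1) = max (pvM nums k' p) (pvWin nums m (p+1)).sum := by
      rw [pvM, ← hmval]
      exact if_pos ⟨hk'le, hmnd1⟩
    rw [pvGetD_nat hmn, hadd, hsum2, hdisc2, hsum3, hL1, hM1]
    push_cast
    ring_nf
  · rw [if_neg hrec]
    have hL2 : pvL nums k' (p+1) = m := by unfold pvL; omega
    have hM2 : pvM nums k' (p+1) = pvM nums k' p := by
      rw [pvM]
      apply if_neg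
      rintro ⟨h1, h2⟩
      have := pvDmin_le_iff.mpr h2
      omega
    rw [hadd, hsum2, hL2, hM2]

theorem pvFoldA (nums : List Int) (k' : Nat) (hk1 : 1 ≤ k') :
    ∀ p, p ≤ nums.length →
    List.foldl (pvStepA nums (k' : Int)) (PySem.Set.empty, 0, 0, 0)
        (List.map (fun (j : Nat) => (j : Int)) (List.range p))
      = (pvWin nums (pvL nums k' p) p, ((pvL nums k' p : Nat) : Int),
         (pvWin nums (pvL nums k' p) p).sum, pvM nums k' p) := by
  intro p
  induction p with
  | zero =>
      intro _
      have hd0 : pvDmin nums 0 = 0 := Nat.le_zero.mp (pvDmin_le 0)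
      have h0 : pvL nums k' 0 = 0 := by unfold pvL; omega
      rw [h0]
      simp [pvWin, pvM, PySem.Set.empty]
  | succ p ih =>
      intro hp1
      rw [List.range_succ, List.map_append, List.foldl_append, ih (by omega)]
      simpa using pvStepA_spec nums k' hk1 p (by omega)

-- B-side: set(window) has full length iff the window is duplicate-free
theorem pvOfList_sublist (xs : List Int) : List.Sublist (PySem.Set.ofList xs) xs := by
  induction xs with
  | nil => simp [PySem.Set.ofList_nil]
  | cons x xs ih =>
      rw [PySem.Set.ofList_cons]
      exact (List.Sublist.cons₂ x (List.filter_sublist.trans ih))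

theorem pvOfList_len_iff (xs : List Int) :
    (PySem.Set.ofList xs).length = xs.length ↔ xs.Nodup := by
  constructor
  · intro h
    have := (pvOfList_sublist xs).eq_of_length h
    rw [← this]; exact PySem.Set.nodup_ofList xs
  · intro h; rw [PySem.Set.ofList_eq_self_of_nodup xs h]

theorem pvM_zero_of_lt (nums : List Int) (k' : Nat) : ∀ p, p < k' → pvM nums k' p = 0 := by
  intro p
  induction p with
  | zero => intro _; rfl
  | succ q ih =>
      intro h
      show pvM nums k' (q+1) = 0
      rw [pvM, if_neg (by omega), ih (by omega)]

theorem pvFoldB (nums : List Int) (k' : Nat) (hk1 : 1 ≤ k') (hkn : k' ≤ nums.length + 1) :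
    ∀ j, j ≤ nums.length + 1 - k' →
    List.foldl
      (fun maxs i =>
        let w := PySem.List.slice nums (some i) (some (i + (k' : Int)))
        if ((PySem.Set.ofList w).length : Int) = (k' : Int) then max maxs w.sum else maxs)
      0 (List.map (fun (j : Nat) => (j : Int)) (List.range j))
      = pvM nums k' (k' - 1 + j) := by
  intro j
  induction j with
  | zero =>
      intro _
      simp [pvM_zero_of_lt nums k' (k' - 1) (by omega)]
  | succ j ih =>
      intro hj
      rw [List.range_succ, List.map_append, List.foldl_append, ih (by omega)]
      simp only [List.map_cons, List.map_nil, List.foldl_cons, List.foldl_nil]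
      have hjk : j + k' ≤ nums.length := by omega
      have hw : PySem.List.slice nums (some (j : Int)) (some ((j : Int) + (k' : Int)))
          = pvWin nums j (j + k') := by
        rw [PySem.List.slice_natCast_add]
        unfold pvWin
        rw [List.drop_take]
        congr 1
        omega
      have hlen : (pvWin nums j (j + k')).length = k' := by
        unfold pvWin
        simp [List.length_drop, List.length_take]
        omega
      have hidx : k' - 1 + (j + 1) = (k' - 1 + j) + 1 := by omega
      have hidx2 : (k' - 1 + j) + 1 - k' = j := by omega
      have hidx3 : (k' - 1 + j) + 1 = j + k' := by omega
      rw [hidx, pvM, hidx2, hidx3, hw]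
      by_cases hnd : (pvWin nums j (j + k')).Nodup
      · rw [if_pos (by rw [PySem.Set.ofList_eq_self_of_nodup _ hnd, hlen]),
            if_pos ⟨by omega, hnd⟩]
      · rw [if_neg, if_neg]
        · rintro ⟨_, h2⟩; exact hnd h2
        · intro hc
          apply hnd
          apply (pvOfList_len_iff _).mp
          rw [hlen]
          omega

theorem pvA_eq_M (nums : List Int) (k : Int) (hk : 1 ≤ k) :
    maximumSubarraySum nums k = pvM nums k.toNat nums.length := by
  obtain ⟨k', hk1, rfl⟩ : ∃ k' : Nat, 1 ≤ k' ∧ k = (k' : Int) := ⟨k.toNat, by omega, by omega⟩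
  unfold maximumSubarraySum
  rw [PySem.List.pyRange_zero_nat, pvFoldA nums k' hk1 nums.length le_rfl]
  simp

theorem pvB_eq_M (nums : List Int) (k : Int) (hk : 1 ≤ k) :
    maximumSubarraySum_alt nums k = pvM nums k.toNat nums.length := by
  obtain ⟨k', hk1, rfl⟩ : ∃ k' : Nat, 1 ≤ k' ∧ k = (k' : Int) := ⟨k.toNat, by omega, by omega⟩
  unfold maximumSubarraySum_alt
  rw [if_neg (by omega)]
  by_cases hbig : nums.length + 1 < k'
  · rw [PySem.List.pyRange_one_eq_nil (by omega : (nums.length : Int) - (k' : Int) + 1 ≤ 0)]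
    simp [pvM_zero_of_lt nums k' nums.length (by omega)]
  · have hb : (nums.length : Int) - (k' : Int) + 1 = ((nums.length + 1 - k' : Nat) : Int) := by
      omega
    rw [hb, PySem.List.pyRange_zero_nat,
      pvFoldB nums k' hk1 (by omega) (nums.length + 1 - k') le_rfl,
      show k' - 1 + (nums.length + 1 - k') = nums.length from by omega]
    simp

theorem pvB_zero (nums : List Int) (k : Int) (hk : k ≤ 0) :
    maximumSubarraySum_alt nums k = 0 := by
  unfold maximumSubarraySum_alt
  exact if_pos hk

theorem pvA_zero (nums : List Int) (k : Int) (hk : k ≤ 0) :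
    maximumSubarraySum nums k = 0 := by
  unfold maximumSubarraySum
  rw [PySem.List.pyRange_zero_nat]
  suffices h : ∀ p, p ≤ nums.length → ∃ l, l ≤ p ∧ (pvWin nums l p).Nodup ∧
      List.foldl (pvStepA nums k) (PySem.Set.empty, 0, 0, 0)
          (List.map (fun (j : Nat) => (j : Int)) (List.range p))
        = (pvWin nums l p, (l : Int), (pvWin nums l p).sum, 0) by
    obtain ⟨l, _, _, he⟩ := h nums.length le_rfl
    rw [he]
  intro p
  induction p with
  | zero =>
      intro _
      exact ⟨0, le_rfl, by simp [pvWin], by simp [pvWin, PySem.Set.empty]⟩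
  | succ p ih =>
      intro hp1
      obtain ⟨l, hl, hnd, he⟩ := ih (by omega)
      have hp : p < nums.length := by omega
      rw [List.range_succ, List.map_append, List.foldl_append, he]
      simp only [List.map_cons, List.map_nil, List.foldl_cons, List.foldl_nil]
      simp only [pvStepA]
      rw [pvWhileA_spec nums p hp (nums.length + 1) l hl (by omega) hnd]
      set m := max l (pvDmin nums (p+1)) with hm
      have hdp : pvDmin nums (p+1) ≤ p := pvDmin_succ_le hp
      have hmp : m ≤ p := by omega
      have hmnd1 : (pvWin nums m (p+1)).Nodup :=
        pvWin_mono_nodup (by omega : pvDmin nums (p+1) ≤ m) (pvDmin_nodup nums (p+1))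
      have hnotmem : nums[p]'hp ∉ pvWin nums m p := ((pvWin_nodup_succ_iff hmp hp).mp hmnd1).2
      rw [pvGetD_nat hp]
      dsimp only
      rw [if_neg (by omega : ¬((p : Int) - (m : Int) + 1 = k))]
      refine ⟨m, by omega, hmnd1, ?_⟩
      have hadd : PySem.Set.add (pvWin nums m p) (nums[p]'hp) = pvWin nums m (p+1) := by
        rw [PySem.Set.add_of_not_mem hnotmem]
        exact (pvWin_succ hmp hp).symm
      have hsum2 : (pvWin nums m p).sum + nums[p]'hp = (pvWin nums m (p+1)).sum := by
        rw [pvWin_succ hmp hp, List.sum_append, List.sum_cons, List.sum_nil, add_zero]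
      rw [hadd, hsum2]

-- ===== VERDICT (by name: the statement is the Claim_ definition above) =====
theorem maximumSubarraySum_spec : Claim_equal_maximumSubarraySum := by
  intro nums k _
  unfold Spec_maximumSubarraySum
  rcases (by omega : k ≤ 0 ∨ 1 ≤ k) with hk | hk
  · rw [pvA_zero nums k hk, pvB_zero nums k hk]
  · rw [pvA_eq_M nums k hk, pvB_eq_M nums k hk]
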